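-- pv_equiv track=rewrite | github.com/leosles/AEG | trabalho_aeg.py | mover_minotauro_perseguicao
-- ===== SOURCE A (Python) =====
-- import heapq
--
-- def caminho_minimo(grafo, origem, destino):
--     n = len(grafo)
--
--     dist = [float('inf')] * n # Lista das distâncias
--
--     anterior = [-1] * n
--
--     dist[origem] = 0
--
--     heap = [(0, origem)]
--
--     while heap:
--         d, u = heapq.heappop(heap)
--
--         if u == destino:
--             break
--
--         if d > dist[u]:
--             continue
--
--         for v, w in grafo[u]:
--             nova_dist = d + w
--
--             if nova_dist < dist[v]:
--                 dist[v] = nova_dist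
--                 anterior[v] = u
--                 heapq.heappush(heap, (nova_dist, v))
--
--     # Reconstrói o caminho
--     caminho = []
--     u = destino
--
--     while u != -1:
--         caminho.append(u)
--         u = anterior[u]
--
--     caminho.reverse()
--
--     return caminho if caminho[0] == origem else []
--
-- def mover_minotauro_perseguicao(grafo, pos_minotauro, pos_prisioneiro, passos_restantes):
--     pos_atual = pos_minotauro
--
--     for _ in range(min(2, passos_restantes)):
--         if pos_atual == pos_prisioneiro:
--             break
--
--         caminho = caminho_minimo(grafo, pos_atual, pos_prisioneiro)
--
--         if len(caminho) > 1:
--             pos_atual = caminho[1]  # Próximo vértice no caminho mínimo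
--
--         else:
--             break
--
--     return pos_atual
-- ===== SOURCE B (Python) =====
-- # B: O(V^2) array-scan Dijkstra: no priority queue at all; a visited array plus a linear
-- # min-scan over dist each round (smallest index on ties), and the next step is read by
-- # walking the predecessor chain instead of building and reversing the full path.
--
-- def _dijkstra_scan(grafo, origem, destino):
--     n = len(grafo)
--     dist = [float('inf')] * n
--     pai = [-1] * n
--     visitado = [False] * n
--     dist[origem] = 0
--     for _ in range(n):
--         u = -1
--         for i in range(n):
--             if not visitado[i] and (u == -1 or dist[i] < dist[u]):
--                 u = i
--         if u == -1 or dist[u] == float('inf') or u == destino: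
--             break
--         visitado[u] = True
--         for v, w in grafo[u]:
--             nova = dist[u] + w
--             if nova < dist[v]:
--                 dist[v] = nova
--                 pai[v] = u
--     return pai
--
-- def _proximo_passo(grafo, origem, destino):
--     pai = _dijkstra_scan(grafo, origem, destino)
--     u = destino
--     while u != -1:
--         if pai[u] == origem:
--             return u
--         u = pai[u]
--     return None
--
-- def mover_minotauro_perseguicao(grafo, pos_minotauro, pos_prisioneiro, passos_restantes):
--     def perseguir(pos, k):
--         if k <= 0 or pos == pos_prisioneiro:
--             return pos
--         prox = _proximo_passo(grafo, pos, pos_prisioneiro)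
--         if prox is None:
--             return pos
--         return perseguir(prox, k - 1)
--     return perseguir(pos_minotauro, min(2, passos_restantes))
-- ===== Notes on version B (the rewrite author's own statement) =====
-- stated objective: alternative
-- what changed: Dijkstra's heapq priority queue is replaced by the O(V^2) array-scan variant (a visited array and a linear minimum scan over dist each round, taking the smallest index on ties), the full path reconstruction with reverse and head check is replaced by a direct walk along the predecessor chain that returns the next step, and the bounded pursuit loop is recursive.
-- outside the precondition, e.g. on mover_minotauro_perseguicao([[], [(0, 0)]], -1, 0, 1): A returns -1, B returns 1; on mover_minotauro_perseguicao([[(0, -1), (1, 1)], []], 0, 1, 1): A does not finish within the time limit, B returns 1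
import Mathlib
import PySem

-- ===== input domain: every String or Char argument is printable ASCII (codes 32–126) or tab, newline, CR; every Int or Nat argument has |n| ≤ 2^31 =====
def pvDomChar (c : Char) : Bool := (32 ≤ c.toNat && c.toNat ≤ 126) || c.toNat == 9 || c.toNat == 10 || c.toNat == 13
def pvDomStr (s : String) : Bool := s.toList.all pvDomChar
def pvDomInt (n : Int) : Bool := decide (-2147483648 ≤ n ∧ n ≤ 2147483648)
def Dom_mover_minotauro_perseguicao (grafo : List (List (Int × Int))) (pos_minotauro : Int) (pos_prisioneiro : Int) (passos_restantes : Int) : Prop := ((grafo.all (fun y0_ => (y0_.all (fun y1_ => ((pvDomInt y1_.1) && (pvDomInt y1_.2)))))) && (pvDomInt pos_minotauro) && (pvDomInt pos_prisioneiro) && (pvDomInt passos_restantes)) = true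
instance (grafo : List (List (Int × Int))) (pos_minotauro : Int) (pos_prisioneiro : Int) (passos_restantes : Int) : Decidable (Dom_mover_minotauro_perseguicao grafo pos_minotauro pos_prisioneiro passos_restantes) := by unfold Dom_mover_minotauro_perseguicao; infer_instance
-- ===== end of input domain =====

-- B replaces A's heapq-based Dijkstra by the O(V^2) array-scan variant (visited array +
-- linear min-scan, no priority queue) and the full path reconstruction by a direct
-- predecessor-chain walk; same return value on the stated domain.

-- ===== PORT A =====
-- Shared index helpers. dist entries: `none` plays float('inf').  The defaults of the
-- `.getD` forms are never reached on inputs admitted by Pre_ (all indices in range there).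
def dget (l : List (Option Int)) (i : Int) : Option Int := (PySem.List.pyGet? l i).getD none
def aget (l : List Int) (i : Int) : Int := (PySem.List.pyGet? l i).getD (-1)
def eget (g : List (List (Int × Int))) (i : Int) : List (Int × Int) := (PySem.List.pyGet? g i).getD []
-- a < dist[v]  /  a > dist[u]  with inf-aware comparison (exact: int vs float('inf'))
def ltInf (a : Int) (o : Option Int) : Bool := match o with | none => true | some x => decide (a < x)
def gtInf (a : Int) (o : Option Int) : Bool := match o with | none => false | some x => decide (x < a)
-- Python's tuple order on heap entries (d, u): ≤
def pleB (a b : Int × Int) : Bool := decide (a.1 < b.1) || (decide (a.1 = b.1) && decide (a.2 ≤ b.2))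

-- heapq.heappop returns the minimum (d, u) pair and removes it; ported exactly as
-- min-of-list (first minimum) + erase of its first occurrence.
def minFold (x : Int × Int) (l : List (Int × Int)) : Int × Int :=
  l.foldl (fun m b => if pleB b m then b else m) x

-- body of `for v, w in grafo[u]` (relaxation; push = heap append for A)
def relaxA (u d : Int) (st : List (Option Int) × List Int × List (Int × Int)) (e : Int × Int) :
    List (Option Int) × List Int × List (Int × Int) :=
  let nova := d + e.2
  if ltInf nova (dget st.1 e.1) then
    (PySem.List.pySetD st.1 e.1 (some nova), PySem.List.pySetD st.2.1 e.1 u, st.2.2 ++ [(nova, e.1)])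
  else st

-- `while heap:` of caminho_minimo (fuel = loop-iteration counter, large enough on Pre_ inputs)
def loopA (grafo : List (List (Int × Int))) (destino : Int) :
    Nat → List (Option Int) → List Int → List (Int × Int) → List (Option Int) × List Int
  | 0, dist, ant, _ => (dist, ant)
  | f+1, dist, ant, heap =>
    match heap with
    | [] => (dist, ant)
    | h :: t =>
      let m := minFold h t
      let rest := (h :: t).erase m
      if m.2 = destino then (dist, ant)
      else if gtInf m.1 (dget dist m.2) then loopA grafo destino f dist ant rest
      else
        let st := (eget grafo m.2).foldl (relaxA m.2 m.1) (dist, ant, rest)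
        loopA grafo destino f st.1 st.2.1 st.2.2

-- `while u != -1: caminho.append(u); u = anterior[u]`
def chainA (ant : List Int) : Nat → Int → List Int
  | 0, _ => []
  | f+1, u => if u = -1 then [] else u :: chainA ant f (aget ant u)

def caminho_minimo (grafo : List (List (Int × Int))) (origem destino : Int) : List Int :=
  let n := grafo.length
  let fuel := n + (grafo.map List.length).sum + 2
  let dist := PySem.List.pySetD (List.replicate n (none : Option Int)) origem (some 0)
  let ant : List Int := List.replicate n (-1)
  let r := loopA grafo destino fuel dist ant [(0, origem)]
  let caminho := (chainA r.2 (n+1) destino).reverse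
  if caminho.head? = some origem then caminho else []

-- `for _ in range(min(2, passos_restantes)):` with its two breaks
def moverLoopA (grafo : List (List (Int × Int))) (pris : Int) : Nat → Int → Int
  | 0, pos => pos
  | c+1, pos =>
    if pos = pris then pos
    else
      let caminho := caminho_minimo grafo pos pris
      if 1 < caminho.length then
        moverLoopA grafo pris c ((PySem.List.pyGet? caminho 1).getD pos)
      else pos

def mover_minotauro_perseguicao (grafo : List (List (Int × Int))) (pos_minotauro : Int) (pos_prisioneiro : Int) (passos_restantes : Int) : Int :=
  moverLoopA grafo pos_prisioneiro (min 2 passos_restantes).toNat pos_minotauro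

-- ===== PORT B =====
-- visited-array getter (default unreachable: every access is in range)
def bget (l : List Bool) (i : Int) : Bool := (PySem.List.pyGet? l i).getD true
-- `dist[i] < dist[u]` on floats where `none` is float('inf')
def ltD : Option Int → Option Int → Bool
  | some a, some b => decide (a < b)
  | some _, none => true
  | none, _ => false

-- `u = -1; for i in range(n): if not visitado[i] and (u == -1 or dist[i] < dist[u]): u = i`
def pickF (dist : List (Option Int)) (vis : List Bool) (u : Int) (i : Nat) : Int :=
  if !bget vis (i : Int) && (decide (u = -1) || ltD (dget dist (i : Int)) (dget dist u)) then (i : Int) else u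

def pickLoop (dist : List (Option Int)) (vis : List Bool) (n : Nat) : Int :=
  (List.range n).foldl (pickF dist vis) (-1)

-- body of `for v, w in grafo[u]` (nova = dist[u] + w read live; inf + w = inf)
def relaxS (u : Int) (st : List (Option Int) × List Int) (e : Int × Int) :
    List (Option Int) × List Int :=
  let nova : Option Int := match dget st.1 u with | none => none | some du => some (du + e.2)
  if ltD nova (dget st.1 e.1) then
    (PySem.List.pySetD st.1 e.1 nova, PySem.List.pySetD st.2 e.1 u)
  else st

-- `for _ in range(n):` of _dijkstra_scan with its break
def loopS (grafo : List (List (Int × Int))) (destino : Int) (n : Nat) :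
    Nat → List (Option Int) → List Int → List Bool → List (Option Int) × List Int
  | 0, dist, pai, _ => (dist, pai)
  | f+1, dist, pai, vis =>
    let u := pickLoop dist vis n
    if u = -1 ∨ dget dist u = none ∨ u = destino then (dist, pai)
    else
      let st := (eget grafo u).foldl (relaxS u) (dist, pai)
      loopS grafo destino n f st.1 st.2 (PySem.List.pySetD vis u true)

-- `while u != -1: if pai[u] == origem: return u; u = pai[u]`
def walkB (pai : List Int) (origem : Int) : Nat → Int → Option Int
  | 0, _ => none
  | f+1, u =>
    if u = -1 then none
    else if aget pai u = origem then some u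
    else walkB pai origem f (aget pai u)

def proximo_passo (grafo : List (List (Int × Int))) (origem destino : Int) : Option Int :=
  let n := grafo.length
  let dist := PySem.List.pySetD (List.replicate n (none : Option Int)) origem (some 0)
  let pai : List Int := List.replicate n (-1)
  let vis : List Bool := List.replicate n false
  let r := loopS grafo destino n n dist pai vis
  walkB r.2 origem n destino

def perseguir (grafo : List (List (Int × Int))) (pris : Int) : Nat → Int → Int
  | 0, pos => pos
  | k+1, pos =>
    if pos = pris then pos
    else
      match proximo_passo grafo pos pris with
      | none => pos
      | some prox => perseguir grafo pris k prox

def mover_minotauro_perseguicao_alt (grafo : List (List (Int × Int))) (pos_minotauro : Int) (pos_prisioneiro : Int) (passos_restantes : Int) : Int :=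
  perseguir grafo pos_prisioneiro (min 2 passos_restantes).toNat pos_minotauro

-- ===== PRECONDITION & SPEC =====
-- Unless the pursuit is vacuous (no steps left, or minotaur already at the prisoner),
-- Pre_ excludes inputs on which A raises IndexError (out-of-range positions or edge
-- endpoints), inputs hitting Python's accidental negative-index wraparound, and graphs
-- with negative edge weights, on which Dijkstra's invariants fail and A can loop forever
-- (negative cycle); B does the natural thing there.
def Pre_mover_minotauro_perseguicao (grafo : List (List (Int × Int))) (pos_minotauro : Int) (pos_prisioneiro : Int) (passos_restantes : Int) : Prop :=
  passos_restantes ≤ 0 ∨ pos_minotauro = pos_prisioneiro ∨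
  (0 ≤ pos_minotauro ∧ pos_minotauro < (grafo.length : Int) ∧
   0 ≤ pos_prisioneiro ∧ pos_prisioneiro < (grafo.length : Int) ∧
   ∀ adj ∈ grafo, ∀ e ∈ adj, 0 ≤ e.1 ∧ e.1 < (grafo.length : Int) ∧ 0 ≤ e.2)
instance (grafo : List (List (Int × Int))) (pos_minotauro : Int) (pos_prisioneiro : Int) (passos_restantes : Int) : Decidable (Pre_mover_minotauro_perseguicao grafo pos_minotauro pos_prisioneiro passos_restantes) := by unfold Pre_mover_minotauro_perseguicao; infer_instance

def pvWitness_mover_minotauro_perseguicao : (List (List (Int × Int))) × Int × Int × Int :=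
  ([[(1, 1)], []], 0, 1, 2)

def Spec_mover_minotauro_perseguicao (grafo : List (List (Int × Int))) (pos_minotauro : Int) (pos_prisioneiro : Int) (passos_restantes : Int) (out : Int) : Prop := out = mover_minotauro_perseguicao_alt grafo pos_minotauro pos_prisioneiro passos_restantes
instance (grafo : List (List (Int × Int))) (pos_minotauro : Int) (pos_prisioneiro : Int) (passos_restantes : Int) (out : Int) : Decidable (Spec_mover_minotauro_perseguicao grafo pos_minotauro pos_prisioneiro passos_restantes out) := by unfold Spec_mover_minotauro_perseguicao; infer_instance

-- ===== CLAIM (what is proved, stated in full; the proofs are below) =====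
def Claim_equal_mover_minotauro_perseguicao : Prop := ∀ (grafo : List (List (Int × Int))) (pos_minotauro : Int) (pos_prisioneiro : Int) (passos_restantes : Int), Dom_mover_minotauro_perseguicao grafo pos_minotauro pos_prisioneiro passos_restantes → Pre_mover_minotauro_perseguicao grafo pos_minotauro pos_prisioneiro passos_restantes → Spec_mover_minotauro_perseguicao grafo pos_minotauro pos_prisioneiro passos_restantes (mover_minotauro_perseguicao grafo pos_minotauro pos_prisioneiro passos_restantes)

-- ===== LEMMAS AND PROOFS =====

theorem witness_ok : Dom_mover_minotauro_perseguicao pvWitness_mover_minotauro_perseguicao.1 pvWitness_mover_minotauro_perseguicao.2.1 pvWitness_mover_minotauro_perseguicao.2.2.1 pvWitness_mover_minotauro_perseguicao.2.2.2 ∧ Pre_mover_minotauro_perseguicao pvWitness_mover_minotauro_perseguicao.1 pvWitness_mover_minotauro_perseguicao.2.1 pvWitness_mover_minotauro_perseguicao.2.2.1 pvWitness_mover_minotauro_perseguicao.2.2.2 := by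
  constructor <;> decide

-- ---- basic facts about the tuple order ----
theorem pleB_refl (a : Int × Int) : pleB a a = true := by
  rcases a with ⟨a1, a2⟩
  simp [pleB]

theorem pleB_total {a b : Int × Int} (h : pleB a b = false) : pleB b a = true := by
  rcases a with ⟨a1, a2⟩; rcases b with ⟨b1, b2⟩
  simp [pleB] at *
  omega

theorem pleB_trans {a b c : Int × Int} (h1 : pleB a b = true) (h2 : pleB b c = true) : pleB a c = true := by
  rcases a with ⟨a1, a2⟩; rcases b with ⟨b1, b2⟩; rcases c with ⟨c1, c2⟩
  simp [pleB] at *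
  omega

-- ---- the scanned minimum: it is a member and a lower bound ----
theorem minFold_cons (x y : Int × Int) (l : List (Int × Int)) :
    minFold x (y :: l) = minFold (if pleB y x then y else x) l := rfl

theorem minFold_mem (x : Int × Int) (l : List (Int × Int)) : minFold x l ∈ x :: l := by
  induction l generalizing x with
  | nil => simp [minFold]
  | cons y t ih =>
    rw [minFold_cons]
    rcases List.mem_cons.mp (ih (if pleB y x then y else x)) with h | h
    · rw [h]
      by_cases hc : pleB y x = true <;> simp [hc]
    · simp [List.mem_cons]
      tauto

theorem minFold_le (x : Int × Int) (l : List (Int × Int)) :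
    ∀ y ∈ x :: l, pleB (minFold x l) y = true := by
  induction l generalizing x with
  | nil =>
    intro y hy
    simp at hy
    subst hy
    simpa [minFold] using pleB_refl _
  | cons y t ih =>
    intro z hz
    rw [minFold_cons]
    have hmem : minFold (if pleB y x then y else x) t ∈ (if pleB y x then y else x) :: t :=
      minFold_mem _ t
    have hle : ∀ w ∈ (if pleB y x then y else x) :: t, pleB (minFold (if pleB y x then y else x) t) w = true := ih _
    have hhead : pleB (minFold (if pleB y x then y else x) t) (if pleB y x then y else x) = true :=
      hle _ (List.mem_cons_self)
    have hix : pleB (if pleB y x then y else x) x = true := by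
      by_cases hc : pleB y x = true
      · rw [if_pos hc]; exact hc
      · rw [if_neg hc]; exact pleB_refl x
    have hiy : pleB (if pleB y x then y else x) y = true := by
      by_cases hc : pleB y x = true
      · rw [if_pos hc]; exact pleB_refl y
      · rw [if_neg hc]; exact pleB_total (Bool.eq_false_iff.mpr hc)
    rcases List.mem_cons.mp hz with rfl | hz2
    · exact pleB_trans hhead hix
    · rcases List.mem_cons.mp hz2 with rfl | hz3
      · exact pleB_trans hhead hiy
      · exact hle _ (List.mem_cons_of_mem _ hz3)

-- ---- facts about the float order ltD ----
theorem ltD_some (a : Int) (o : Option Int) : ltD (some a) o = ltInf a o := by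
  cases o <;> rfl

theorem ltD_irrefl (o : Option Int) : ltD o o = false := by
  cases o <;> simp [ltD]

theorem ltD_ge_trans {a b c : Option Int} (h1 : ltD a b = true) (h2 : ltD c b = false) :
    ltD c a = false := by
  cases a <;> cases b <;> cases c <;> simp [ltD] at * <;> omega

theorem ltD_lt_of {a b c : Option Int} (h1 : ltD a b = true) (h2 : ltD c b = false) :
    ltD a c = true := by
  cases a <;> cases b <;> cases c <;> simp [ltD] at * <;> omega

-- ---- index-helper lemmas ----
theorem length_pySetD' {α : Type} (l : List α) (i : Int) (x : α) :
    (PySem.List.pySetD l i x).length = l.length := PySem.List.length_pySetD l i x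

theorem dget_set_self (l : List (Option Int)) (i : Int) (x : Option Int)
    (h0 : 0 ≤ i) (h1 : i < (l.length : Int)) :
    dget (PySem.List.pySetD l i x) i = x := by
  unfold dget
  rw [PySem.List.pySetD_of_nonneg l x h0, PySem.List.pyGet?_of_nonneg _ h0]
  have hlt : i.toNat < l.length := by omega
  simp [hlt]

theorem dget_set_ne (l : List (Option Int)) (i j : Int) (x : Option Int)
    (h0 : 0 ≤ i) (h1 : i < (l.length : Int)) (hj0 : 0 ≤ j) (hj1 : j < (l.length : Int))
    (hne : i ≠ j) : dget (PySem.List.pySetD l i x) j = dget l j := by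
  unfold dget
  rw [PySem.List.pySetD_of_nonneg l x h0, PySem.List.pyGet?_of_nonneg _ hj0, PySem.List.pyGet?_of_nonneg _ hj0]
  have : i.toNat ≠ j.toNat := by omega
  simp [List.getElem?_set_ne, this]

theorem aget_set_ne (l : List Int) (i j : Int) (x : Int)
    (h0 : 0 ≤ i) (h1 : i < (l.length : Int)) (hj0 : 0 ≤ j) (hj1 : j < (l.length : Int))
    (hne : i ≠ j) : aget (PySem.List.pySetD l i x) j = aget l j := by
  unfold aget
  rw [PySem.List.pySetD_of_nonneg l x h0, PySem.List.pyGet?_of_nonneg _ hj0, PySem.List.pyGet?_of_nonneg _ hj0]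
  have : i.toNat ≠ j.toNat := by omega
  simp [List.getElem?_set_ne, this]

theorem bget_set_self (l : List Bool) (i : Int) (x : Bool)
    (h0 : 0 ≤ i) (h1 : i < (l.length : Int)) :
    bget (PySem.List.pySetD l i x) i = x := by
  unfold bget
  rw [PySem.List.pySetD_of_nonneg l x h0, PySem.List.pyGet?_of_nonneg _ h0]
  have hlt : i.toNat < l.length := by omega
  simp [hlt]

theorem bget_set_ne (l : List Bool) (i j : Int) (x : Bool)
    (h0 : 0 ≤ i) (h1 : i < (l.length : Int)) (hj0 : 0 ≤ j) (hj1 : j < (l.length : Int))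
    (hne : i ≠ j) : bget (PySem.List.pySetD l i x) j = bget l j := by
  unfold bget
  rw [PySem.List.pySetD_of_nonneg l x h0, PySem.List.pyGet?_of_nonneg _ hj0, PySem.List.pyGet?_of_nonneg _ hj0]
  have : i.toNat ≠ j.toNat := by omega
  simp [List.getElem?_set_ne, this]

theorem bget_replicate_false (n : Nat) (v : Int) (h0 : 0 ≤ v) (h1 : v < (n : Int)) :
    bget (List.replicate n false) v = false := by
  unfold bget
  rw [PySem.List.pyGet?_of_nonneg _ h0]
  have hlt : v.toNat < n := by omega
  simp [hlt]

theorem dget_replicate_none (n : Nat) (v : Int) :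
    dget (List.replicate n (none : Option Int)) v = none := by
  unfold dget
  cases hg : PySem.List.pyGet? (List.replicate n (none : Option Int)) v with
  | none => rfl
  | some x =>
    have := PySem.List.mem_of_pyGet?_eq_some _ hg
    have hx : x = none := List.eq_of_mem_replicate this
    simp [hx]

theorem aget_mem_or (l : List Int) (i : Int) : aget l i = -1 ∨ aget l i ∈ l := by
  unfold aget
  cases hg : PySem.List.pyGet? l i with
  | none => simp
  | some v =>
    right
    simpa using PySem.List.mem_of_pyGet?_eq_some _ hg

theorem mem_aset (l : List Int) (i : Int) (x y : Int) (h0 : 0 ≤ i)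
    (hy : y ∈ PySem.List.pySetD l i x) : y ∈ l ∨ y = x := by
  rw [PySem.List.pySetD_of_nonneg l x h0] at hy
  exact List.mem_or_eq_of_mem_set hy

-- ---- selection scan: characterization of pickLoop ----
theorem pickLoop_succ (dist : List (Option Int)) (vis : List Bool) (n : Nat) :
    pickLoop dist vis (n+1) = pickF dist vis (pickLoop dist vis n) n := by
  simp [pickLoop, List.range_succ]

theorem pickSpec (dist : List (Option Int)) (vis : List Bool) :
    ∀ n : Nat,
      (pickLoop dist vis n = -1 ∧ ∀ i : Nat, i < n → bget vis (i : Int) = true) ∨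
      (∃ r : Nat, pickLoop dist vis n = (r : Int) ∧ r < n ∧ bget vis (r : Int) = false ∧
        (∀ i : Nat, i < n → bget vis (i : Int) = false →
          ltD (dget dist (i : Int)) (dget dist (r : Int)) = false) ∧
        (∀ i : Nat, i < n → bget vis (i : Int) = false → i < r →
          ltD (dget dist (r : Int)) (dget dist (i : Int)) = true)) := by
  intro n
  induction n with
  | zero => exact Or.inl ⟨rfl, fun i hi => absurd hi (Nat.not_lt_zero i)⟩
  | succ n ih =>
    rw [pickLoop_succ]
    rcases ih with ⟨hm1, hall⟩ | ⟨r, hr, hrn, hrv, hmin, htie⟩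
    · rw [hm1]
      by_cases hv : bget vis (n : Int) = false
      · right
        refine ⟨n, ?_, by omega, hv, ?_, ?_⟩
        · simp [pickF, hv]
        · intro i hi hiv
          have : i = n := by
            by_contra hne
            have := hall i (by omega)
            rw [this] at hiv; cases hiv
          subst this
          exact ltD_irrefl _
        · intro i hi hiv hir
          have := hall i (by omega)
          rw [this] at hiv; cases hiv
      · left
        have hv' : bget vis (n : Int) = true := by
          cases h : bget vis (n : Int)
          · exact absurd h hv
          · rfl
        constructor
        · simp [pickF, hv']
        · intro i hi
          by_cases hin : i = n
          · subst hin; exact hv'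
          · exact hall i (by omega)
    · rw [hr]
      have hrne : ((r : Nat) : Int) ≠ -1 := by omega
      by_cases hv : bget vis (n : Int) = false
      · by_cases hlt : ltD (dget dist (n : Int)) (dget dist (r : Int)) = true
        · right
          refine ⟨n, ?_, by omega, hv, ?_, ?_⟩
          · simp [pickF, hv, hrne, hlt]
          · intro i hi hiv
            by_cases hin : i = n
            · subst hin; exact ltD_irrefl _
            · exact ltD_ge_trans hlt (hmin i (by omega) hiv)
          · intro i hi hiv hir
            exact ltD_lt_of hlt (hmin i (by omega) hiv)
        · right
          have hlt' : ltD (dget dist (n : Int)) (dget dist (r : Int)) = false := by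
            cases h : ltD (dget dist (n : Int)) (dget dist (r : Int))
            · rfl
            · exact absurd h hlt
          refine ⟨r, ?_, by omega, hrv, ?_, ?_⟩
          · simp [pickF, hv, hrne, hlt']
          · intro i hi hiv
            by_cases hin : i = n
            · subst hin; exact hlt'
            · exact hmin i (by omega) hiv
          · intro i hi hiv hir
            have hin : i ≠ n := by omega
            exact htie i (by omega) hiv hir
      · have hv' : bget vis (n : Int) = true := by
          cases h : bget vis (n : Int)
          · exact absurd h hv
          · rfl
        right
        refine ⟨r, ?_, by omega, hrv, ?_, ?_⟩
        · simp [pickF, hv']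
        · intro i hi hiv
          by_cases hin : i = n
          · subst hin; rw [hv'] at hiv; cases hiv
          · exact hmin i (by omega) hiv
        · intro i hi hiv hir
          by_cases hin : i = n
          · subst hin; rw [hv'] at hiv; cases hiv
          · exact htie i (by omega) hiv hir

-- ---- the bisimulation invariant between A's heap state and B's visited-array state ----
structure SInv (n : Nat) (dist : List (Option Int)) (ant : List Int)
    (heap : List (Int × Int)) (vis : List Bool) : Prop where
  hdl : dist.length = n
  hal : ant.length = n
  hvl : vis.length = n
  hrange : ∀ p ∈ heap, 0 ≤ p.2 ∧ p.2 < (n : Int)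
  hub : ∀ p ∈ heap, ∃ dv, dget dist p.2 = some dv ∧ dv ≤ p.1
  hact : ∀ v : Int, 0 ≤ v → v < (n : Int) → bget vis v = false →
           ∀ dv, dget dist v = some dv → (dv, v) ∈ heap
  hstale : ∀ p ∈ heap, dget dist p.2 = some p.1 → bget vis p.2 = false
  hvis : ∀ v : Int, 0 ≤ v → v < (n : Int) → bget vis v = true →
           ∃ dv, dget dist v = some dv ∧ ∀ p ∈ heap, dv ≤ p.1
  hnd : heap.Nodup

-- edge work still pending on B's side (used only as a termination measure for A's heap loop)
def pend (grafo : List (List (Int × Int))) (vis : List Bool) : Nat :=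
  ∑ i ∈ Finset.range grafo.length, (if bget vis (i : Int) = true then 0 else (eget grafo (i : Int)).length)

theorem loopA_succ (grafo : List (List (Int × Int))) (destino : Int) (f : Nat)
    (dist : List (Option Int)) (ant : List Int) (h : Int × Int) (t : List (Int × Int)) :
    loopA grafo destino (f+1) dist ant (h :: t) =
      (if (minFold h t).2 = destino then (dist, ant)
       else if gtInf (minFold h t).1 (dget dist (minFold h t).2) then
         loopA grafo destino f dist ant ((h :: t).erase (minFold h t))
       else
         let st := (eget grafo (minFold h t).2).foldl (relaxA (minFold h t).2 (minFold h t).1)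
           (dist, ant, (h :: t).erase (minFold h t))
         loopA grafo destino f st.1 st.2.1 st.2.2) := rfl

theorem loopS_succ (grafo : List (List (Int × Int))) (destino : Int) (n f : Nat)
    (dist : List (Option Int)) (pai : List Int) (vis : List Bool) :
    loopS grafo destino n (f+1) dist pai vis =
      (if pickLoop dist vis n = -1 ∨ dget dist (pickLoop dist vis n) = none ∨ pickLoop dist vis n = destino
       then (dist, pai)
       else
         let st := (eget grafo (pickLoop dist vis n)).foldl (relaxS (pickLoop dist vis n)) (dist, pai)
         loopS grafo destino n f st.1 st.2 (PySem.List.pySetD vis (pickLoop dist vis n) true)) := rfl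

-- if no unvisited vertex has finite distance, the scan loop never changes the state
theorem loopS_stuck (grafo : List (List (Int × Int))) (destino : Int) (n : Nat)
    (dist : List (Option Int)) (pai : List Int) (vis : List Bool)
    (h : ∀ v : Int, 0 ≤ v → v < (n : Int) → bget vis v = false → dget dist v = none) :
    ∀ fb, loopS grafo destino n fb dist pai vis = (dist, pai) := by
  intro fb
  cases fb with
  | zero => rfl
  | succ f =>
    rw [loopS_succ]
    rcases pickSpec dist vis n with ⟨hm1, _⟩ | ⟨r, hr, hrn, hrv, _, _⟩
    · rw [if_pos (Or.inl hm1)]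
    · rw [hr, if_pos (Or.inr (Or.inl (h (r : Int) (by omega) (by omega) hrv)))]

-- pick selects exactly the heap minimum when that minimum is an active entry
theorem pick_active (n : Nat) (dist : List (Option Int)) (ant : List Int)
    (heap : List (Int × Int)) (vis : List Bool) (m : Int × Int)
    (hSI : SInv n dist ant heap vis)
    (hmem : m ∈ heap) (hmin : ∀ p ∈ heap, pleB m p = true)
    (hactm : dget dist m.2 = some m.1) :
    pickLoop dist vis n = m.2 := by
  obtain ⟨hm0, hmn⟩ := hSI.hrange m hmem
  have hmv : bget vis m.2 = false := hSI.hstale m hmem hactm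
  have hcast : ((m.2.toNat : Nat) : Int) = m.2 := by omega
  rcases pickSpec dist vis n with ⟨_, hall⟩ | ⟨r, hr, hrn, hrv, hmin', htie⟩
  · exfalso
    have := hall m.2.toNat (by omega)
    rw [hcast] at this
    rw [this] at hmv; cases hmv
  · rw [hr]
    have h1 := hmin' m.2.toNat (by omega)
    rw [hcast] at h1
    have h1 := h1 hmv
    cases hdr : dget dist (r : Int) with
    | none =>
      exfalso
      rw [hactm, hdr] at h1
      simp [ltD] at h1
    | some dr =>
      have hrmem : (dr, (r : Int)) ∈ heap :=
        hSI.hact (r : Int) (by omega) (by omega) hrv dr hdr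
      have hple := hmin _ hrmem
      rw [hactm, hdr] at h1
      simp [ltD] at h1
      simp [pleB] at hple
      by_cases heq : m.2 = (r : Int)
      · exact heq.symm
      · exfalso
        have hm1dr : m.1 = dr := by omega
        have hlt : m.2 < (r : Int) := by omega
        have h2 := htie m.2.toNat (by omega)
        rw [hcast] at h2
        have h2 := h2 hmv (by omega)
        rw [hactm, hdr] at h2
        simp [ltD] at h2
        omega

-- erasing a stale minimum keeps the invariant (same visited array)
theorem erase_SInv (n : Nat) (dist : List (Option Int)) (ant : List Int)
    (heap : List (Int × Int)) (vis : List Bool) (m : Int × Int)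
    (hSI : SInv n dist ant heap vis) (hmem : m ∈ heap)
    (hstaleM : dget dist m.2 ≠ some m.1) :
    SInv n dist ant (heap.erase m) vis := by
  refine ⟨hSI.hdl, hSI.hal, hSI.hvl, ?_, ?_, ?_, ?_, ?_, hSI.hnd.erase m⟩
  · exact fun p hp => hSI.hrange p (List.mem_of_mem_erase hp)
  · exact fun p hp => hSI.hub p (List.mem_of_mem_erase hp)
  · intro v h0 h1 hv dv hdv
    have hne : (dv, v) ≠ m := by
      intro he
      apply hstaleM
      rw [← he]
      exact hdv
    exact (List.mem_erase_of_ne hne).mpr (hSI.hact v h0 h1 hv dv hdv)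
  · exact fun p hp => hSI.hstale p (List.mem_of_mem_erase hp)
  · intro v h0 h1 hv
    obtain ⟨dv, hdv, hb⟩ := hSI.hvis v h0 h1 hv
    exact ⟨dv, hdv, fun p hp => hb p (List.mem_of_mem_erase hp)⟩

-- popping an active minimum and marking it visited keeps the invariant
theorem pop_SInv (n : Nat) (dist : List (Option Int)) (ant : List Int)
    (heap : List (Int × Int)) (vis : List Bool) (m : Int × Int)
    (hSI : SInv n dist ant heap vis) (hmem : m ∈ heap)
    (hmin : ∀ p ∈ heap, pleB m p = true)
    (hactm : dget dist m.2 = some m.1) :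
    SInv n dist ant (heap.erase m) (PySem.List.pySetD vis m.2 true) ∧
    (∀ x : Int, 0 ≤ x → x < (n : Int) → bget (PySem.List.pySetD vis m.2 true) x = true →
      ∃ dx, dget dist x = some dx ∧ dx ≤ m.1) := by
  obtain ⟨hm0, hmn⟩ := hSI.hrange m hmem
  have hmv : bget vis m.2 = false := hSI.hstale m hmem hactm
  have hvlen : m.2 < (vis.length : Int) := by rw [hSI.hvl]; exact hmn
  have hbs : ∀ x : Int, 0 ≤ x → x < (n : Int) → x ≠ m.2 →
      bget (PySem.List.pySetD vis m.2 true) x = bget vis x := by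
    intro x h0 h1 hne
    exact bget_set_ne vis m.2 x true hm0 hvlen h0 (by rw [hSI.hvl]; exact h1) (fun h => hne h.symm)
  have hmnotmem : m ∉ heap.erase m := by
    intro hcon
    exact ((hSI.hnd.mem_erase_iff).mp hcon).1 rfl
  constructor
  · refine ⟨hSI.hdl, hSI.hal, by rw [length_pySetD', hSI.hvl], ?_, ?_, ?_, ?_, ?_, hSI.hnd.erase m⟩
    · exact fun p hp => hSI.hrange p (List.mem_of_mem_erase hp)
    · exact fun p hp => hSI.hub p (List.mem_of_mem_erase hp)
    · intro v h0 h1 hv dv hdv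
      have hvne : v ≠ m.2 := by
        intro he
        rw [he, bget_set_self vis m.2 true hm0 hvlen] at hv
        cases hv
      rw [hbs v h0 h1 hvne] at hv
      have hne : (dv, v) ≠ m := by
        intro he
        apply hvne
        rw [← he]
      exact (List.mem_erase_of_ne hne).mpr (hSI.hact v h0 h1 hv dv hdv)
    · intro p hp hdp
      have hpr := hSI.hrange p (List.mem_of_mem_erase hp)
      have hpne : p.2 ≠ m.2 := by
        intro he
        have hub := hSI.hub p (List.mem_of_mem_erase hp)
        obtain ⟨dv, hdv, _⟩ := hub
        rw [he, hactm] at hdv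
        rw [he, hactm] at hdp
        have : p.1 = m.1 := by
          injection hdp with h'; omega
        have hpm : p = m := by
          rcases p with ⟨p1, p2⟩; rcases m with ⟨m1, m2⟩
          simp at he this ⊢
          exact ⟨this, he⟩
        exact hmnotmem (hpm ▸ hp)
      rw [hbs p.2 hpr.1 hpr.2 hpne]
      exact hSI.hstale p (List.mem_of_mem_erase hp) hdp
    · intro v h0 h1 hv
      by_cases hvm : v = m.2
      · subst hvm
        refine ⟨m.1, hactm, fun p hp => ?_⟩
        have := hmin p (List.mem_of_mem_erase hp)
        simp [pleB] at this
        omega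
      · rw [hbs v h0 h1 hvm] at hv
        obtain ⟨dv, hdv, hb⟩ := hSI.hvis v h0 h1 hv
        exact ⟨dv, hdv, fun p hp => hb p (List.mem_of_mem_erase hp)⟩
  · intro x h0 h1 hx
    by_cases hxm : x = m.2
    · subst hxm
      exact ⟨m.1, hactm, le_refl _⟩
    · rw [hbs x h0 h1 hxm] at hx
      obtain ⟨dx, hdx, hb⟩ := hSI.hvis x h0 h1 hx
      exact ⟨dx, hdx, hb m hmem⟩

-- relaxation fold: A's and B's updates agree, the invariant is preserved,
-- and the heap grows by at most one entry per edge
theorem relax_all (n : Nat) (u d : Int) (hu0 : 0 ≤ u) (hun : u < (n : Int)) :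
    ∀ (E : List (Int × Int)), (∀ e ∈ E, 0 ≤ e.1 ∧ e.1 < (n : Int) ∧ 0 ≤ e.2) →
    ∀ dist ant heap vis,
      SInv n dist ant heap vis →
      bget vis u = true →
      dget dist u = some d →
      (∀ x : Int, 0 ≤ x → x < (n : Int) → bget vis x = true →
        ∃ dx, dget dist x = some dx ∧ dx ≤ d) →
      (E.foldl (relaxA u d) (dist, ant, heap)).1 = (E.foldl (relaxS u) (dist, ant)).1 ∧
      (E.foldl (relaxA u d) (dist, ant, heap)).2.1 = (E.foldl (relaxS u) (dist, ant)).2 ∧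
      SInv n (E.foldl (relaxA u d) (dist, ant, heap)).1
             (E.foldl (relaxA u d) (dist, ant, heap)).2.1
             (E.foldl (relaxA u d) (dist, ant, heap)).2.2 vis ∧
      (E.foldl (relaxA u d) (dist, ant, heap)).2.2.length ≤ heap.length + E.length := by
  intro E
  induction E with
  | nil =>
    intro _ dist ant heap vis hSI _ _ _
    exact ⟨rfl, rfl, hSI, by simp⟩
  | cons e E' ih =>
    intro hE dist ant heap vis hSI hvu hdu hvd
    obtain ⟨he0, hen, hw0⟩ := hE e List.mem_cons_self
    have hE' : ∀ e' ∈ E', 0 ≤ e'.1 ∧ e'.1 < (n : Int) ∧ 0 ≤ e'.2 :=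
      fun e' h' => hE e' (List.mem_cons_of_mem _ h')
    by_cases hc : ltInf (d + e.2) (dget dist e.1) = true
    · -- improving step
      have hvv : bget vis e.1 = false := by
        cases hb : bget vis e.1
        · rfl
        · exfalso
          obtain ⟨dx, hdx, hxd⟩ := hvd e.1 he0 hen hb
          rw [hdx] at hc
          simp [ltInf] at hc
          omega
      have hvne : e.1 ≠ u := by
        intro he
        rw [he, hvu] at hvv; cases hvv
      have hel : e.1 < (dist.length : Int) := by rw [hSI.hdl]; exact hen
      have hael : e.1 < (ant.length : Int) := by rw [hSI.hal]; exact hen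
      have ra : relaxA u d (dist, ant, heap) e =
          (PySem.List.pySetD dist e.1 (some (d + e.2)), PySem.List.pySetD ant e.1 u,
            heap ++ [(d + e.2, e.1)]) := by
        simp [relaxA, hc]
      have rb : relaxS u (dist, ant) e =
          (PySem.List.pySetD dist e.1 (some (d + e.2)), PySem.List.pySetD ant e.1 u) := by
        simp only [relaxS, hdu]
        rw [ltD_some, if_pos hc]
      have hdu' : dget (PySem.List.pySetD dist e.1 (some (d + e.2))) u = some d := by
        rw [dget_set_ne dist e.1 u _ he0 hel hu0 (by rw [hSI.hdl]; exact hun) hvne]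
        exact hdu
      have hvd' : ∀ x : Int, 0 ≤ x → x < (n : Int) → bget vis x = true →
          ∃ dx, dget (PySem.List.pySetD dist e.1 (some (d + e.2))) x = some dx ∧ dx ≤ d := by
        intro x h0 h1 hx
        have hxne : e.1 ≠ x := by
          intro he
          rw [he, hx] at hvv; cases hvv
        rw [dget_set_ne dist e.1 x _ he0 hel h0 (by rw [hSI.hdl]; exact h1) hxne]
        exact hvd x h0 h1 hx
      have hnotmem : (d + e.2, e.1) ∉ heap := by
        intro hcon
        obtain ⟨dv, hdv, hle⟩ := hSI.hub _ hcon
        simp at hdv hle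
        rw [hdv] at hc
        simp [ltInf] at hc
        omega
      have hSI' : SInv n (PySem.List.pySetD dist e.1 (some (d + e.2)))
          (PySem.List.pySetD ant e.1 u) (heap ++ [(d + e.2, e.1)]) vis := by
        refine ⟨by rw [length_pySetD', hSI.hdl], by rw [length_pySetD', hSI.hal], hSI.hvl,
          ?_, ?_, ?_, ?_, ?_, ?_⟩
        · intro p hp
          rcases List.mem_append.mp hp with hp' | hp'
          · exact hSI.hrange p hp'
          · have : p = (d + e.2, e.1) := by simpa using hp'
            subst this
            exact ⟨he0, hen⟩
        · intro p hp
          rcases List.mem_append.mp hp with hp' | hp'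
          · obtain ⟨dv, hdv, hle⟩ := hSI.hub p hp'
            by_cases hpe : p.2 = e.1
            · refine ⟨d + e.2, ?_, ?_⟩
              · rw [hpe]
                exact dget_set_self dist e.1 _ he0 hel
              · rw [hpe] at hdv
                rw [hdv] at hc
                simp [ltInf] at hc
                omega
            · refine ⟨dv, ?_, hle⟩
              rw [dget_set_ne dist e.1 p.2 _ he0 hel (hSI.hrange p hp').1
                (by rw [hSI.hdl]; exact (hSI.hrange p hp').2) (fun h => hpe h.symm)]
              exact hdv
          · have : p = (d + e.2, e.1) := by simpa using hp'
            subst this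
            exact ⟨d + e.2, dget_set_self dist e.1 _ he0 hel, le_refl _⟩
        · intro v h0 h1 hv dv hdv
          by_cases hveq : v = e.1
          · subst hveq
            rw [dget_set_self dist e.1 _ he0 hel] at hdv
            have : dv = d + e.2 := by injection hdv with h'; omega
            subst this
            exact List.mem_append_right _ List.mem_cons_self
          · rw [dget_set_ne dist e.1 v _ he0 hel h0 (by rw [hSI.hdl]; exact h1)
              (fun h => hveq h.symm)] at hdv
            exact List.mem_append_left _ (hSI.hact v h0 h1 hv dv hdv)
        · intro p hp hdp
          rcases List.mem_append.mp hp with hp' | hp'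
          · by_cases hpe : p.2 = e.1
            · rw [hpe]; exact hvv
            · rw [dget_set_ne dist e.1 p.2 _ he0 hel (hSI.hrange p hp').1
                (by rw [hSI.hdl]; exact (hSI.hrange p hp').2) (fun h => hpe h.symm)] at hdp
              exact hSI.hstale p hp' hdp
          · have : p = (d + e.2, e.1) := by simpa using hp'
            subst this
            exact hvv
        · intro v h0 h1 hv
          have hvne' : e.1 ≠ v := by
            intro he
            rw [he, hv] at hvv; cases hvv
          obtain ⟨dv, hdv, hb⟩ := hSI.hvis v h0 h1 hv
          obtain ⟨dx, hdx, hxd⟩ := hvd v h0 h1 hv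
          rw [hdv] at hdx
          have : dv = dx := Option.some.inj hdx
          subst this
          refine ⟨dv, ?_, ?_⟩
          · rw [dget_set_ne dist e.1 v _ he0 hel h0 (by rw [hSI.hdl]; exact h1) hvne']
            exact hdv
          · intro p hp
            rcases List.mem_append.mp hp with hp' | hp'
            · exact hb p hp'
            · have : p = (d + e.2, e.1) := by simpa using hp'
              subst this
              show dv ≤ d + e.2
              omega
        · rw [List.nodup_append]
          refine ⟨hSI.hnd, List.nodup_singleton _, ?_⟩
          intro a ha b hb hab
          have hbe : b = (d + e.2, e.1) := by simpa using hb
          exact hnotmem (hbe ▸ hab ▸ ha)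
      have step := ih hE' (PySem.List.pySetD dist e.1 (some (d + e.2)))
        (PySem.List.pySetD ant e.1 u) (heap ++ [(d + e.2, e.1)]) vis hSI' hvu hdu' hvd'
      simp only [List.foldl_cons, ra, rb]
      refine ⟨step.1, step.2.1, step.2.2.1, ?_⟩
      have := step.2.2.2
      simp at this ⊢
      omega
    · -- non-improving step
      have ra : relaxA u d (dist, ant, heap) e = (dist, ant, heap) := by simp [relaxA, hc]
      have hc' : ltInf (d + e.2) (dget dist e.1) = false := by
        cases h : ltInf (d + e.2) (dget dist e.1)
        · rfl
        · exact absurd h hc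
      have rb : relaxS u (dist, ant) e = (dist, ant) := by
        simp only [relaxS, hdu]
        rw [ltD_some, if_neg (by rw [hc']; exact Bool.false_ne_true)]
      simp only [List.foldl_cons, ra, rb]
      have step := ih hE' dist ant heap vis hSI hvu hdu hvd
      refine ⟨step.1, step.2.1, step.2.2.1, ?_⟩
      have := step.2.2.2
      simp at this ⊢
      omega

-- measure lemmas
theorem pend_set (grafo : List (List (Int × Int))) (vis : List Bool) (u : Int)
    (hu0 : 0 ≤ u) (hun : u < (grafo.length : Int)) (hvl : vis.length = grafo.length)
    (hf : bget vis u = false) :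
    pend grafo (PySem.List.pySetD vis u true) + (eget grafo u).length = pend grafo vis := by
  have hk : u.toNat ∈ Finset.range grafo.length := by
    simp
    omega
  have hcast : ((u.toNat : Nat) : Int) = u := by omega
  unfold pend
  rw [← Finset.add_sum_erase _ _ hk, ← Finset.add_sum_erase _ _ hk]
  have h1 : (if bget (PySem.List.pySetD vis u true) ((u.toNat : Nat) : Int) = true then 0
      else (eget grafo ((u.toNat : Nat) : Int)).length) = 0 := by
    rw [hcast, bget_set_self vis u true hu0 (by rw [hvl]; exact hun)]
    simp
  have h2 : (if bget vis ((u.toNat : Nat) : Int) = true then 0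
      else (eget grafo ((u.toNat : Nat) : Int)).length) = (eget grafo u).length := by
    rw [hcast, hf]
    simp
  rw [h1, h2]
  have h3 : ∑ i ∈ (Finset.range grafo.length).erase u.toNat,
      (if bget (PySem.List.pySetD vis u true) (i : Int) = true then 0
       else (eget grafo (i : Int)).length) =
      ∑ i ∈ (Finset.range grafo.length).erase u.toNat,
      (if bget vis (i : Int) = true then 0 else (eget grafo (i : Int)).length) := by
    apply Finset.sum_congr rfl
    intro i hi
    have hine : i ≠ u.toNat := (Finset.mem_erase.mp hi).1
    have hilt : i < grafo.length := Finset.mem_range.mp (Finset.mem_erase.mp hi).2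
    rw [bget_set_ne vis u (i : Int) true hu0 (by rw [hvl]; exact hun) (by omega)
      (by rw [hvl]; omega) (by omega)]
  rw [h3]
  omega

theorem count_false_set : ∀ (l : List Bool) (k : Nat), l[k]? = some false →
    (l.set k true).count false + 1 = l.count false := by
  intro l
  induction l with
  | nil => intro k h; simp at h
  | cons b t ih =>
    intro k h
    cases k with
    | zero =>
      simp at h
      subst h
      simp [List.count_cons]
    | succ k =>
      simp at h
      have := ih k h
      simp [List.count_cons]
      omega

theorem count_false_set' (vis : List Bool) (u : Int) (hu0 : 0 ≤ u)
    (hul : u < (vis.length : Int)) (hf : bget vis u = false) :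
    (PySem.List.pySetD vis u true).count false + 1 = vis.count false := by
  rw [PySem.List.pySetD_of_nonneg vis true hu0]
  apply count_false_set
  unfold bget at hf
  rw [PySem.List.pyGet?_of_nonneg _ hu0] at hf
  cases hg : vis[u.toNat]? with
  | none =>
    exfalso
    have : u.toNat < vis.length := by omega
    rw [List.getElem?_eq_getElem this] at hg
    cases hg
  | some b =>
    rw [hg] at hf
    simp at hf
    rw [hf]

theorem count_false_pos (vis : List Bool) (u : Int) (hu0 : 0 ≤ u)
    (hul : u < (vis.length : Int)) (hf : bget vis u = false) :
    0 < vis.count false := by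
  unfold bget at hf
  rw [PySem.List.pyGet?_of_nonneg _ hu0] at hf
  have hlt : u.toNat < vis.length := by omega
  rw [List.getElem?_eq_getElem hlt] at hf
  simp at hf
  have : false ∈ vis := by
    rw [← hf]
    exact List.getElem_mem hlt
  exact List.count_pos_iff.mpr this

-- ---- the main bisimulation: A's heap loop = B's scan loop ----
theorem loop_eq (grafo : List (List (Int × Int))) (destino : Int)
    (HG : ∀ adj ∈ grafo, ∀ e ∈ adj, 0 ≤ e.1 ∧ e.1 < (grafo.length : Int) ∧ 0 ≤ e.2)
    (hd0 : 0 ≤ destino) (hdn : destino < (grafo.length : Int)) :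
    ∀ fa fb dist ant heap vis,
      SInv grafo.length dist ant heap vis →
      bget vis destino = false →
      heap.length + pend grafo vis < fa →
      vis.count false ≤ fb →
      loopA grafo destino fa dist ant heap = loopS grafo destino grafo.length fb dist ant vis := by
  intro fa
  induction fa with
  | zero =>
    intro fb dist ant heap vis _ _ hfa _
    omega
  | succ fa ih =>
    intro fb dist ant heap vis hSI hdv hfa hfb
    cases heap with
    | nil =>
      rw [loopS_stuck grafo destino grafo.length dist ant vis ?_ fb]
      · rfl
      · intro v h0 h1 hv
        cases hd : dget dist v with
        | none => rfl
        | some dv =>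
          exfalso
          have := hSI.hact v h0 h1 hv dv hd
          simp at this
    | cons h t =>
      have hmem := minFold_mem h t
      have hmin := minFold_le h t
      obtain ⟨hm0, hmn⟩ := hSI.hrange _ hmem
      obtain ⟨dm, hdm, hdmle⟩ := hSI.hub _ hmem
      rw [loopA_succ]
      by_cases hstale : dm < (minFold h t).1
      · -- stale entry: A skips it, B's state is untouched
        have hne : (minFold h t).2 ≠ destino := by
          intro he
          have hdvmem := hSI.hact destino hd0 hdn hdv dm (he ▸ hdm)
          have := hmin _ hdvmem
          simp [pleB] at this
          omega
        rw [if_neg hne]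
        have hgt : gtInf (minFold h t).1 (dget dist (minFold h t).2) = true := by
          rw [hdm]
          simp [gtInf]
          omega
        rw [if_pos hgt]
        have hSIe := erase_SInv grafo.length dist ant _ vis (minFold h t) hSI hmem
          (by rw [hdm]; intro hcon; injection hcon with h'; omega)
        have hlen : ((h :: t).erase (minFold h t)).length + 1 = (h :: t).length :=
          List.length_erase_add_one hmem
        exact ih fb dist ant _ vis hSIe hdv (by omega) hfb
      · -- active entry: dm = m.1
        have hdm' : dget dist (minFold h t).2 = some (minFold h t).1 := by
          rw [hdm]
          congr 1
          omega
        have hpick : pickLoop dist vis grafo.length = (minFold h t).2 :=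
          pick_active grafo.length dist ant _ vis (minFold h t) hSI hmem hmin hdm'
        by_cases hdest : (minFold h t).2 = destino
        · rw [if_pos hdest]
          cases fb with
          | zero => rfl
          | succ fb' =>
            rw [loopS_succ, hpick, if_pos (Or.inr (Or.inr hdest))]
        · rw [if_neg hdest]
          have hmv : bget vis (minFold h t).2 = false := hSI.hstale _ hmem hdm'
          have hgt : gtInf (minFold h t).1 (dget dist (minFold h t).2) = false := by
            rw [hdm']
            simp [gtInf]
          rw [if_neg (by rw [hgt]; exact Bool.false_ne_true)]
          cases fb with
          | zero =>
            exfalso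
            have := count_false_pos vis (minFold h t).2 hm0
              (by rw [hSI.hvl]; exact hmn) hmv
            omega
          | succ fb' =>
            rw [loopS_succ, hpick]
            have hguard : ¬((minFold h t).2 = -1 ∨ dget dist (minFold h t).2 = none ∨
                (minFold h t).2 = destino) := by
              intro hcon
              rcases hcon with h1 | h1 | h1
              · omega
              · rw [hdm'] at h1; cases h1
              · exact hdest h1
            rw [if_neg hguard]
            obtain ⟨hSIp, hvd⟩ := pop_SInv grafo.length dist ant _ vis (minFold h t)
              hSI hmem hmin hdm'
            have hvu' : bget (PySem.List.pySetD vis (minFold h t).2 true) (minFold h t).2 = true :=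
              bget_set_self vis (minFold h t).2 true hm0 (by rw [hSI.hvl]; exact hmn)
            have hedges : ∀ e ∈ eget grafo (minFold h t).2,
                0 ≤ e.1 ∧ e.1 < (grafo.length : Int) ∧ 0 ≤ e.2 := by
              intro e hegt
              have hadj : eget grafo (minFold h t).2 ∈ grafo := by
                unfold eget
                rw [PySem.List.pyGet?_of_nonneg _ hm0]
                have hlt : (minFold h t).2.toNat < grafo.length := by omega
                simp [hlt]
              exact HG _ hadj e hegt
            obtain ⟨e1, e2, e3, e4⟩ := relax_all grafo.length (minFold h t).2 (minFold h t).1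
              hm0 hmn (eget grafo (minFold h t).2) hedges dist ant
              ((h :: t).erase (minFold h t)) (PySem.List.pySetD vis (minFold h t).2 true)
              hSIp hvu' hdm' hvd
            simp only []
            rw [← e1, ← e2]
            apply ih
            · exact e3
            · rw [bget_set_ne vis (minFold h t).2 destino true hm0
                (by rw [hSI.hvl]; exact hmn) hd0 (by rw [hSI.hvl]; exact hdn)
                (fun h => hdest h)]
              exact hdv
            · have hlen : ((h :: t).erase (minFold h t)).length + 1 = (h :: t).length :=
                List.length_erase_add_one hmem
              have hpend := pend_set grafo vis (minFold h t).2 hm0 hmn hSI.hvl hmv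
              omega
            · have hcnt := count_false_set' vis (minFold h t).2 hm0
                (by rw [hSI.hvl]; exact hmn) hmv
              omega

-- ---- the K-invariant: with in-range vertices and nonnegative weights the source
-- ---- keeps cost 0 and predecessor -1, and all predecessor entries stay in range ----
theorem relax_fold_K (grafo : List (List (Int × Int))) (o u d : Int)
    (ho : 0 ≤ o) (hon : o < (grafo.length : Int)) (hd : 0 ≤ d)
    (hu : 0 ≤ u ∧ u < (grafo.length : Int)) :
    ∀ edges : List (Int × Int),
      (∀ e ∈ edges, 0 ≤ e.1 ∧ e.1 < (grafo.length : Int) ∧ 0 ≤ e.2) →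
    ∀ dist ant heap,
      dist.length = grafo.length → ant.length = grafo.length →
      dget dist o = some 0 → aget ant o = -1 →
      (∀ x ∈ ant, x = -1 ∨ (0 ≤ x ∧ x < (grafo.length : Int))) →
      (∀ p ∈ heap, 0 ≤ p.1 ∧ 0 ≤ p.2 ∧ p.2 < (grafo.length : Int)) →
      (edges.foldl (relaxA u d) (dist, ant, heap)).1.length = grafo.length ∧
      (edges.foldl (relaxA u d) (dist, ant, heap)).2.1.length = grafo.length ∧
      dget (edges.foldl (relaxA u d) (dist, ant, heap)).1 o = some 0 ∧
      aget (edges.foldl (relaxA u d) (dist, ant, heap)).2.1 o = -1 ∧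
      (∀ x ∈ (edges.foldl (relaxA u d) (dist, ant, heap)).2.1, x = -1 ∨ (0 ≤ x ∧ x < (grafo.length : Int))) ∧
      (∀ p ∈ (edges.foldl (relaxA u d) (dist, ant, heap)).2.2, 0 ≤ p.1 ∧ 0 ≤ p.2 ∧ p.2 < (grafo.length : Int)) := by
  intro edges
  induction edges with
  | nil =>
    intro _ dist ant heap h1 h2 h3 h4 h5 h6
    exact ⟨h1, h2, h3, h4, h5, h6⟩
  | cons e es ih =>
    intro he dist ant heap h1 h2 h3 h4 h5 h6
    have he1 := he e List.mem_cons_self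
    have hes : ∀ e' ∈ es, 0 ≤ e'.1 ∧ e'.1 < (grafo.length : Int) ∧ 0 ≤ e'.2 :=
      fun e' h' => he e' (List.mem_cons_of_mem _ h')
    by_cases hc : ltInf (d + e.2) (dget dist e.1) = true
    · have hno : e.1 ≠ o := by
        intro heq
        rw [heq, h3] at hc
        have : d + e.2 < 0 := by simpa [ltInf] using hc
        omega
      have ra : relaxA u d (dist, ant, heap) e =
          (PySem.List.pySetD dist e.1 (some (d + e.2)), PySem.List.pySetD ant e.1 u, heap ++ [(d + e.2, e.1)]) := by
        simp [relaxA, hc]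
      simp only [List.foldl_cons, ra]
      refine ih hes _ _ _ ?_ ?_ ?_ ?_ ?_ ?_
      · rw [length_pySetD', h1]
      · rw [length_pySetD', h2]
      · rw [dget_set_ne dist e.1 o _ he1.1 (by rw [h1]; exact he1.2.1) ho (by rw [h1]; exact hon) hno]
        exact h3
      · rw [aget_set_ne ant e.1 o _ he1.1 (by rw [h2]; exact he1.2.1) ho (by rw [h2]; exact hon) hno]
        exact h4
      · intro x hx
        rcases mem_aset ant e.1 u x he1.1 hx with hx' | rfl
        · exact h5 x hx'
        · exact Or.inr hu
      · intro q hq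
        rcases List.mem_append.mp hq with hq' | hq'
        · exact h6 q hq'
        · have : q = (d + e.2, e.1) := by simpa using hq'
          subst this
          exact ⟨by omega, he1.1, he1.2.1⟩
    · have ra : relaxA u d (dist, ant, heap) e = (dist, ant, heap) := by simp [relaxA, hc]
      simp only [List.foldl_cons, ra]
      exact ih hes _ _ _ h1 h2 h3 h4 h5 h6

theorem loopA_K (grafo : List (List (Int × Int))) (destino o : Int)
    (ho : 0 ≤ o) (hon : o < (grafo.length : Int))
    (HG : ∀ adj ∈ grafo, ∀ e ∈ adj, 0 ≤ e.1 ∧ e.1 < (grafo.length : Int) ∧ 0 ≤ e.2) :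
    ∀ f dist ant heap,
      dist.length = grafo.length → ant.length = grafo.length →
      dget dist o = some 0 → aget ant o = -1 →
      (∀ x ∈ ant, x = -1 ∨ (0 ≤ x ∧ x < (grafo.length : Int))) →
      (∀ p ∈ heap, 0 ≤ p.1 ∧ 0 ≤ p.2 ∧ p.2 < (grafo.length : Int)) →
      aget (loopA grafo destino f dist ant heap).2 o = -1 ∧
      (∀ x ∈ (loopA grafo destino f dist ant heap).2, x = -1 ∨ (0 ≤ x ∧ x < (grafo.length : Int))) := by
  intro f
  induction f with
  | zero =>
    intro dist ant heap _ _ _ h4 h5 _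
    exact ⟨h4, h5⟩
  | succ f ih =>
    intro dist ant heap h1 h2 h3 h4 h5 h6
    cases heap with
    | nil => exact ⟨h4, h5⟩
    | cons h t =>
      rw [loopA_succ]
      have hm := h6 (minFold h t) (minFold_mem h t)
      have h6' : ∀ p ∈ (h :: t).erase (minFold h t), 0 ≤ p.1 ∧ 0 ≤ p.2 ∧ p.2 < (grafo.length : Int) :=
        fun p hp => h6 p (List.mem_of_mem_erase hp)
      by_cases hdest : (minFold h t).2 = destino
      · rw [if_pos hdest]
        exact ⟨h4, h5⟩
      · rw [if_neg hdest]
        by_cases hst : gtInf (minFold h t).1 (dget dist (minFold h t).2) = true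
        · rw [if_pos hst]
          exact ih _ _ _ h1 h2 h3 h4 h5 h6'
        · rw [if_neg hst]
          have hedges : ∀ e ∈ eget grafo (minFold h t).2, 0 ≤ e.1 ∧ e.1 < (grafo.length : Int) ∧ 0 ≤ e.2 := by
            intro e hegt
            have hadj : eget grafo (minFold h t).2 ∈ grafo := by
              unfold eget
              rw [PySem.List.pyGet?_of_nonneg _ hm.2.1]
              have hlt : (minFold h t).2.toNat < grafo.length := by omega
              simp [hlt]
            exact HG _ hadj e hegt
          obtain ⟨k1, k2, k3, k4, k5, k6⟩ :=
            relax_fold_K grafo o (minFold h t).2 (minFold h t).1 ho hon hm.1 ⟨hm.2.1, hm.2.2⟩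
              (eget grafo (minFold h t).2) hedges dist ant ((h :: t).erase (minFold h t))
              h1 h2 h3 h4 h5 h6'
          exact ih _ _ _ k1 k2 k3 k4 k5 k6

-- ---- the next step encoded on the raw predecessor chain ----
def nextOf (o : Int) (c : List Int) : Option Int :=
  if c.getLast? = some o ∧ 2 ≤ c.length then getElem? c (c.length - 2) else none

theorem chainA_neg_one (ant : List Int) (f : Nat) : chainA ant f (-1) = [] := by
  cases f <;> simp [chainA]

theorem walkB_neg_one (ant : List Int) (o : Int) (f : Nat) : walkB ant o f (-1) = none := by
  cases f <;> simp [walkB]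

theorem nextOf_pair (o u x : Int) (hxo : x ≠ o) : nextOf o [u, x] = none := by
  simp [nextOf, hxo]

theorem walk_eq_chain (ant : List Int) (o : Int) (ho : o ≠ -1) (hor : aget ant o = -1) :
    ∀ f u, u ≠ -1 → walkB ant o f u = nextOf o (chainA ant (f + 1) u) := by
  intro f
  induction f with
  | zero =>
    intro u hu
    simp [walkB, chainA, hu, nextOf]
  | succ f ih =>
    intro u hu
    rw [show walkB ant o (f+1) u =
        (if u = -1 then none
         else if aget ant u = o then some u
         else walkB ant o f (aget ant u)) from rfl]
    rw [if_neg hu]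
    rw [show chainA ant (f+1+1) u = (if u = -1 then [] else u :: chainA ant (f+1) (aget ant u)) from rfl]
    rw [if_neg hu]
    by_cases heq : aget ant u = o
    · rw [if_pos heq, heq]
      rw [show chainA ant (f+1) o = (if o = -1 then [] else o :: chainA ant f (aget ant o)) from rfl]
      rw [if_neg ho, hor, chainA_neg_one]
      simp [nextOf]
    · rw [if_neg heq]
      by_cases hneg : aget ant u = -1
      · rw [hneg, walkB_neg_one, chainA_neg_one]
        simp [nextOf]
      · rw [ih (aget ant u) hneg]
        rw [show chainA ant (f+1) (aget ant u) =
            (if aget ant u = -1 then [] else aget ant u :: chainA ant f (aget ant (aget ant u))) from rfl]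
        rw [if_neg hneg]
        cases hr : chainA ant f (aget ant (aget ant u)) with
        | nil =>
          rw [nextOf_pair o u (aget ant u) heq]
          simp [nextOf]
        | cons w r' =>
          unfold nextOf
          rw [List.getLast?_cons_cons]
          by_cases hlast : (w :: r').getLast? = some o
          · rw [if_pos ⟨hlast, by simp⟩,
              if_pos ⟨by rw [List.getLast?_cons_cons, List.getLast?_cons_cons]; exact hlast, by simp⟩]
            have e1 : (aget ant u :: w :: r').length - 2 = r'.length := by simp
            have e2 : (u :: aget ant u :: w :: r').length - 2 = r'.length + 1 := by simp
            rw [e1, e2, List.getElem?_cons_succ]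
          · rw [if_neg (fun hcon => hlast hcon.1),
              if_neg (fun hcon => hlast (by
                have := hcon.1
                rw [List.getLast?_cons_cons, List.getLast?_cons_cons] at this
                exact this))]

theorem walkB_some_range (ant : List Int) (o : Int) :
    ∀ f u r, walkB ant o f u = some r → r = u ∨ r ∈ ant := by
  intro f
  induction f with
  | zero =>
    intro u r h
    simp [walkB] at h
  | succ f ih =>
    intro u r h
    rw [show walkB ant o (f+1) u =
        (if u = -1 then none
         else if aget ant u = o then some u
         else walkB ant o f (aget ant u)) from rfl] at h
    by_cases hu : u = -1
    · rw [if_pos hu] at h; cases h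
    · rw [if_neg hu] at h
      by_cases heq : aget ant u = o
      · rw [if_pos heq] at h
        exact Or.inl (by injection h; omega)
      · rw [if_neg heq] at h
        rcases ih _ _ h with rfl | hmem
        · rcases aget_mem_or ant u with hneg | hmem'
          · rw [hneg] at h
            rw [walkB_neg_one] at h
            cases h
          · exact Or.inr hmem'
        · exact Or.inr hmem

theorem walkB_some_ne (ant : List Int) (o : Int) :
    ∀ f u r, walkB ant o f u = some r → r ≠ -1 := by
  intro f
  induction f with
  | zero => intro u r h; simp [walkB] at h
  | succ f ih =>
    intro u r h
    rw [show walkB ant o (f+1) u =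
        (if u = -1 then none
         else if aget ant u = o then some u
         else walkB ant o f (aget ant u)) from rfl] at h
    by_cases hu : u = -1
    · rw [if_pos hu] at h; cases h
    · rw [if_neg hu] at h
      by_cases heq : aget ant u = o
      · rw [if_pos heq] at h
        injection h with h'
        exact h' ▸ hu
      · rw [if_neg heq] at h
        exact ih _ _ h

theorem camNext_eq (o x : Int) (c : List Int) :
    (if 1 < (if c.reverse.head? = some o then c.reverse else []).length then
       some ((PySem.List.pyGet? (if c.reverse.head? = some o then c.reverse else []) 1).getD x)
     else none) = nextOf o c := by
  by_cases hh : c.reverse.head? = some o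
  · rw [if_pos hh]
    have hgl : c.getLast? = some o := by rwa [List.head?_reverse] at hh
    by_cases hlen : 1 < c.length
    · have hlr : 1 < c.reverse.length := by simpa using hlen
      rw [if_pos hlr]
      unfold nextOf
      rw [if_pos ⟨hgl, by omega⟩]
      rw [PySem.List.pyGet?_of_nonneg c.reverse (by norm_num : (0:Int) ≤ 1)]
      have ht : (1:Int).toNat = 1 := rfl
      rw [ht]
      have h2 : getElem? c.reverse 1 = getElem? c (c.length - 1 - 1) :=
        List.getElem?_reverse (by simpa using hlen)
      rw [h2]
      have h3 : c.length - 1 - 1 = c.length - 2 := by omega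
      rw [h3]
      have h4 : c.length - 2 < c.length := by omega
      rw [List.getElem?_eq_getElem h4]
      simp
    · have hlr : ¬ 1 < c.reverse.length := by simpa using hlen
      rw [if_neg hlr]
      unfold nextOf
      rw [if_neg (fun hcon => absurd hcon.2 (by omega))]
  · rw [if_neg hh]
    have hgl : ¬ c.getLast? = some o := by rwa [List.head?_reverse] at hh
    have h0 : ¬ 1 < ([] : List Int).length := by simp
    rw [if_neg h0]
    unfold nextOf
    rw [if_neg (fun hcon => hgl hcon.1)]

-- initial state satisfies the invariant
theorem init_SInv (grafo : List (List (Int × Int))) (o : Int)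
    (ho : 0 ≤ o) (hon : o < (grafo.length : Int)) :
    SInv grafo.length
      (PySem.List.pySetD (List.replicate grafo.length (none : Option Int)) o (some 0))
      (List.replicate grafo.length (-1)) [(0, o)] (List.replicate grafo.length false) := by
  have hdl : (List.replicate grafo.length (none : Option Int)).length = grafo.length := by simp
  have hset : dget (PySem.List.pySetD (List.replicate grafo.length (none : Option Int)) o (some 0)) o = some 0 :=
    dget_set_self _ o _ ho (by rw [hdl]; exact hon)
  refine ⟨by rw [length_pySetD']; simp, by simp, by simp, ?_, ?_, ?_, ?_, ?_, by simp⟩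
  · intro p hp
    have : p = ((0 : Int), o) := by simpa using hp
    subst this
    exact ⟨ho, hon⟩
  · intro p hp
    have : p = ((0 : Int), o) := by simpa using hp
    subst this
    exact ⟨0, hset, le_refl _⟩
  · intro v h0 h1 _ dv hdv
    by_cases hveq : v = o
    · subst hveq
      rw [hset] at hdv
      have : dv = 0 := by injection hdv with h'; omega
      subst this
      simp
    · rw [dget_set_ne _ o v _ ho (by rw [hdl]; exact hon) h0 (by rw [hdl]; exact h1)
        (fun h => hveq h.symm), dget_replicate_none] at hdv
      cases hdv
  · intro p hp _
    have : p = ((0 : Int), o) := by simpa using hp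
    subst this
    exact bget_replicate_false grafo.length o ho hon
  · intro v h0 h1 hv
    rw [bget_replicate_false grafo.length v h0 h1] at hv
    cases hv

theorem pend_init (grafo : List (List (Int × Int))) :
    pend grafo (List.replicate grafo.length false) ≤ (grafo.map List.length).sum := by
  unfold pend
  calc ∑ i ∈ Finset.range grafo.length,
        (if bget (List.replicate grafo.length false) (i : Int) = true then 0
         else (eget grafo (i : Int)).length)
      ≤ ∑ i ∈ Finset.range grafo.length, (eget grafo (i : Int)).length := by
        apply Finset.sum_le_sum
        intro i _
        split <;> omega
    _ = (grafo.map List.length).sum := by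
        induction grafo with
        | nil => simp
        | cons g gs ihg =>
          rw [show (g :: gs).length = gs.length + 1 from rfl, Finset.sum_range_succ']
          have hstep : ∀ i : Nat, eget (g :: gs) ((i + 1 : Nat) : Int) = eget gs (i : Int) := by
            intro i
            unfold eget
            rw [PySem.List.pyGet?_of_nonneg _ (by omega), PySem.List.pyGet?_of_nonneg _ (by omega)]
            have h1 : ((i + 1 : Nat) : Int).toNat = i + 1 := by omega
            have h2 : ((i : Nat) : Int).toNat = i := by omega
            rw [h1, h2, List.getElem?_cons_succ]
          have h0 : eget (g :: gs) ((0 : Nat) : Int) = g := by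
            unfold eget
            rw [PySem.List.pyGet?_of_nonneg _ (by omega)]
            rfl
          simp only [hstep, h0]
          rw [ihg]
          simp
          omega

-- ---- per-step equality: A's path-based next move = B's chain walk ----
theorem step_eq (grafo : List (List (Int × Int))) (o p : Int)
    (ho : 0 ≤ o) (hon : o < (grafo.length : Int))
    (hp : 0 ≤ p) (hpn : p < (grafo.length : Int))
    (HG : ∀ adj ∈ grafo, ∀ e ∈ adj, 0 ≤ e.1 ∧ e.1 < (grafo.length : Int) ∧ 0 ≤ e.2) :
    (∀ x : Int,
      (if 1 < (caminho_minimo grafo o p).length then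
         some ((PySem.List.pyGet? (caminho_minimo grafo o p) 1).getD x)
       else none) = proximo_passo grafo o p) ∧
    (∀ r, proximo_passo grafo o p = some r → 0 ≤ r ∧ r < (grafo.length : Int)) := by
  have hdl : (List.replicate grafo.length (none : Option Int)).length = grafo.length := by simp
  have hloop : loopA grafo p (grafo.length + (grafo.map List.length).sum + 2)
      (PySem.List.pySetD (List.replicate grafo.length (none : Option Int)) o (some 0))
      (List.replicate grafo.length (-1)) [(0, o)] =
      loopS grafo p grafo.length grafo.length
      (PySem.List.pySetD (List.replicate grafo.length (none : Option Int)) o (some 0))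
      (List.replicate grafo.length (-1)) (List.replicate grafo.length false) := by
    apply loop_eq grafo p HG hp hpn
    · exact init_SInv grafo o ho hon
    · exact bget_replicate_false grafo.length p hp hpn
    · have := pend_init grafo
      simp
      omega
    · simp
  obtain ⟨hKa, hKr⟩ := loopA_K grafo p o ho hon HG
      (grafo.length + (grafo.map List.length).sum + 2)
      (PySem.List.pySetD (List.replicate grafo.length (none : Option Int)) o (some 0))
      (List.replicate grafo.length (-1)) [(0, o)]
      (by rw [length_pySetD']; simp)
      (by simp)
      (dget_set_self _ o _ ho (by rw [hdl]; exact hon))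
      (by
        unfold aget
        rw [PySem.List.pyGet?_of_nonneg _ ho]
        have : o.toNat < grafo.length := by omega
        simp [this])
      (by
        intro x hx
        exact Or.inl (List.eq_of_mem_replicate hx))
      (by
        intro q hq
        have : q = ((0:Int), o) := by simpa using hq
        subst this
        exact ⟨le_refl 0, ho, hon⟩)
  have hwalk := walk_eq_chain
      (loopA grafo p (grafo.length + (grafo.map List.length).sum + 2)
        (PySem.List.pySetD (List.replicate grafo.length (none : Option Int)) o (some 0))
        (List.replicate grafo.length (-1)) [(0, o)]).2
      o (by omega) hKa grafo.length p (by omega)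
  constructor
  · intro x
    show (if 1 < (caminho_minimo grafo o p).length then
         some ((PySem.List.pyGet? (caminho_minimo grafo o p) 1).getD x)
       else none) = proximo_passo grafo o p
    unfold caminho_minimo proximo_passo
    simp only []
    rw [← hloop]
    rw [hwalk]
    exact camNext_eq o x _
  · intro r hr
    unfold proximo_passo at hr
    simp only [] at hr
    rw [← hloop] at hr
    rcases walkB_some_range _ o _ _ _ hr with rfl | hmem
    · exact ⟨hp, hpn⟩
    · rcases hKr r hmem with hneg | hrange
      · exact absurd hneg (walkB_some_ne _ o _ _ _ hr)
      · exact hrange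

theorem mover_eq (grafo : List (List (Int × Int))) (p : Int)
    (hp : 0 ≤ p) (hpn : p < (grafo.length : Int))
    (HG : ∀ adj ∈ grafo, ∀ e ∈ adj, 0 ≤ e.1 ∧ e.1 < (grafo.length : Int) ∧ 0 ≤ e.2) :
    ∀ k pos, 0 ≤ pos → pos < (grafo.length : Int) →
      moverLoopA grafo p k pos = perseguir grafo p k pos := by
  intro k
  induction k with
  | zero => intro pos _ _; rfl
  | succ k ih =>
    intro pos hp0 hpn'
    by_cases hpos : pos = p
    · simp [moverLoopA, perseguir, hpos]
    · rw [show moverLoopA grafo p (k+1) pos =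
          (if pos = p then pos
           else if 1 < (caminho_minimo grafo pos p).length then
             moverLoopA grafo p k ((PySem.List.pyGet? (caminho_minimo grafo pos p) 1).getD pos)
           else pos) from rfl, if_neg hpos]
      rw [show perseguir grafo p (k+1) pos =
          (if pos = p then pos
           else match proximo_passo grafo pos p with
             | none => pos
             | some prox => perseguir grafo p k prox) from rfl, if_neg hpos]
      obtain ⟨hstep, hrange⟩ := step_eq grafo pos p hp0 hpn' hp hpn HG
      cases hpp : proximo_passo grafo pos p with
      | none =>
        have hx := hstep pos
        rw [hpp] at hx
        by_cases hlen : 1 < (caminho_minimo grafo pos p).length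
        · rw [if_pos hlen] at hx
          cases hx
        · rw [if_neg hlen]
      | some prox =>
        have hx := hstep pos
        rw [hpp] at hx
        by_cases hlen : 1 < (caminho_minimo grafo pos p).length
        · rw [if_pos hlen] at hx
          rw [if_pos hlen]
          injection hx with hx'
          rw [hx']
          exact ih prox (hrange prox hpp).1 (hrange prox hpp).2
        · rw [if_neg hlen] at hx
          cases hx

theorem mover_eq_self (grafo : List (List (Int × Int))) (p : Int) (k : Nat) :
    moverLoopA grafo p k p = perseguir grafo p k p := by
  cases k <;> simp [moverLoopA, perseguir]

-- ===== VERDICT (by name: the statement is the Claim_ definition above) =====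
theorem mover_minotauro_perseguicao_spec : Claim_equal_mover_minotauro_perseguicao := by
  intro grafo m p k _ hpre
  unfold Spec_mover_minotauro_perseguicao
  unfold mover_minotauro_perseguicao mover_minotauro_perseguicao_alt
  rcases hpre with hk | hmp | ⟨hm0, hmn, hp0, hpn, HG⟩
  · have h0 : (min 2 k).toNat = 0 := by omega
    rw [h0]
    rfl
  · subst hmp
    exact mover_eq_self grafo _ ((min 2 k).toNat)
  · exact mover_eq grafo p hp0 hpn HG ((min 2 k).toNat) m hm0 hmn
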